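-- pv_equiv track=rewrite | github.com/mortyc126-debug/SHA-256 | bit_catalog_relational.py | coupling_matrix
-- ===== SOURCE A (Python) =====
-- def coupling_matrix(clauses, n):
--     """
--     coupling[i][j] = сколько клозов содержат И bit i, И bit j.
--     Чем больше — тем сильнее связь.
--     """
--     matrix = [[0] * n for _ in range(n)]
--     for clause in clauses:
--         vars_in = [v for v, s in clause]
--         for i in range(len(vars_in)):
--             for j in range(i + 1, len(vars_in)):
--                 matrix[vars_in[i]][vars_in[j]] += 1
--                 matrix[vars_in[j]][vars_in[i]] += 1
--     return matrix
-- ===== SOURCE B (Python) =====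
-- def coupling_matrix(clauses, n):
--     """
--     coupling[i][j] = how many clause position pairs couple bit i and bit j.
--     Per clause: count variable multiplicities, then write the outer product of
--     counts (minus the diagonal multiplicity) instead of enumerating position pairs.
--     """
--     matrix = [[0] * n for _ in range(n)]
--     for clause in clauses:
--         if len(clause) < 2:
--             continue
--         cnt = {}
--         for v, s in clause:
--             cnt[v] = cnt.get(v, 0) + 1
--         items = list(cnt.items())
--         for a, ca in items:
--             for b, cb in items:
--                 matrix[a][b] += ca * cb
--             matrix[a][a] -= ca
--     return matrix
-- ===== Notes on version B (the rewrite author's own statement) =====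
-- stated objective: alternative
-- what changed: B never enumerates position pairs: per clause it counts variable multiplicities in a dict and writes the outer product of counts into the matrix (matrix[a][b] += cnt[a]*cnt[b], then matrix[a][a] -= cnt[a]), which equals A's pair enumeration since the number of ordered position pairs (i,j), i!=j, hitting cell (a,b) is cnt[a]*cnt[b] minus cnt[a] on the diagonal.
import Mathlib
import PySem

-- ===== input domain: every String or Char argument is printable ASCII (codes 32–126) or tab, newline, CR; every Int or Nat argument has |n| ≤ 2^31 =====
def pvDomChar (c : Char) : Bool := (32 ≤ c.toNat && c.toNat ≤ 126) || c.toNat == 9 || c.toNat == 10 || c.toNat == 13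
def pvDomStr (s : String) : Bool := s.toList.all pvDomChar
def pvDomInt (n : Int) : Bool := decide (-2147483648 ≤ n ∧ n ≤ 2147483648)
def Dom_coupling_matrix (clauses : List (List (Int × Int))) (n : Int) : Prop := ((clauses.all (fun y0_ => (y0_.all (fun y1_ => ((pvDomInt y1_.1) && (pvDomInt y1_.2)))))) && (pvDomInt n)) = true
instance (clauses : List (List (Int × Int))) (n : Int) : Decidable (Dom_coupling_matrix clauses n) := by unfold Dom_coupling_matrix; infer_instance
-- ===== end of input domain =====

-- B replaces A's position-pair enumeration by per-clause multiplicity counting and an outer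
-- product of counts (matrix[a][b] += cnt[a]*cnt[b], diagonal corrected by -cnt[a]);
-- objective: alternative.

-- ===== PORT A =====
-- Python list index with negative wraparound (hand-ported, exact on in-range indices;
-- out-of-range indices raise IndexError in Python and are excluded by Pre_).
def pvEix (len : Nat) (a : Int) : Int := if a < 0 then a + len else a

-- matrix[a][b] += c : exact wherever Python does not raise (Pre_ excludes the IndexError inputs)
def pvRowAdd (row : List Int) (b c : Int) : List Int :=
  if 0 ≤ pvEix row.length b ∧ pvEix row.length b < (row.length : Int) then
    row.modify (pvEix row.length b).toNat (fun v => v + c)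
  else row

def pvCellAdd (m : List (List Int)) (a b c : Int) : List (List Int) :=
  if 0 ≤ pvEix m.length a ∧ pvEix m.length a < (m.length : Int) then
    m.modify (pvEix m.length a).toNat (fun row => pvRowAdd row b c)
  else m

-- the two Python statements  matrix[a][b] += 1; matrix[b][a] += 1
def pvPairAdd (m : List (List Int)) (a b c : Int) : List (List Int) :=
  pvCellAdd (pvCellAdd m a b c) b a c

def coupling_matrix (clauses : List (List (Int × Int))) (n : Int) : List (List Int) :=
  let matrix := List.replicate n.toNat (List.replicate n.toNat (0 : Int))
  clauses.foldl (fun m clause =>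
    let vars_in := clause.map (fun p => p.1)
    (List.range vars_in.length).foldl (fun m i =>
      (List.range' (i + 1) (vars_in.length - (i + 1))).foldl (fun m j =>
        pvPairAdd m (vars_in.getD i 0) (vars_in.getD j 0) 1) m) m) matrix

-- ===== PORT B =====
def coupling_matrix_alt (clauses : List (List (Int × Int))) (n : Int) : List (List Int) :=
  let matrix := List.replicate n.toNat (List.replicate n.toNat (0 : Int))
  clauses.foldl (fun m clause =>
    if clause.length < 2 then m
    else
      let cnt := clause.foldl (fun d p => d.insert p.1 (d.getD p.1 0 + 1))
        (PySem.Dict.empty : PySem.Dict Int Int)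
      let items := cnt.items
      items.foldl (fun m ac =>
        pvCellAdd
          (items.foldl (fun m bc => pvCellAdd m ac.1 bc.1 (ac.2 * bc.2)) m)
          ac.1 ac.1 (-ac.2)) m) matrix

-- ===== PRECONDITION & SPEC =====
-- Exactly the inputs where Python A returns: every variable of a clause with at least two
-- literals is used as an index into the n×n matrix, raising IndexError unless -n ≤ v < n.
def Pre_coupling_matrix (clauses : List (List (Int × Int))) (n : Int) : Prop :=
  ∀ clause ∈ clauses, 1 < clause.length → ∀ p ∈ clause, -n ≤ p.1 ∧ p.1 < n
instance (clauses : List (List (Int × Int))) (n : Int) : Decidable (Pre_coupling_matrix clauses n) := by unfold Pre_coupling_matrix; infer_instance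

def pvWitness_coupling_matrix : (List (List (Int × Int))) × Int := ([[(0, 1), (1, -1)], [(1, 1), (-2, 1)]], 2)

def Spec_coupling_matrix (clauses : List (List (Int × Int))) (n : Int) (out : List (List Int)) : Prop := out = coupling_matrix_alt clauses n
instance (clauses : List (List (Int × Int))) (n : Int) (out : List (List Int)) : Decidable (Spec_coupling_matrix clauses n out) := by unfold Spec_coupling_matrix; infer_instance

-- ===== CLAIM (what is proved, stated in full; the proofs are below) =====
def Claim_equal_coupling_matrix : Prop := ∀ (clauses : List (List (Int × Int))) (n : Int), Dom_coupling_matrix clauses n → Pre_coupling_matrix clauses n → Spec_coupling_matrix clauses n (coupling_matrix clauses n)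

-- ===== LEMMAS AND PROOFS =====

-- Matrix shape invariant and entry accessor.
def pvWf (n' : Nat) (m : List (List Int)) : Prop :=
  m.length = n' ∧ ∀ row ∈ m, row.length = n'

def pvGetE (m : List (List Int)) (p q : Nat) : Int := (m.getD p []).getD q 0

-- Contribution of one raw Python index a to row/column p of an n'×n' matrix.
def pvInd (n' : Nat) (a : Int) (p : Nat) : Int :=
  if 0 ≤ pvEix n' a ∧ pvEix n' a < (n' : Int) ∧ (pvEix n' a).toNat = p then 1 else 0

theorem pvRowAdd_length (row : List Int) (b c : Int) :
    (pvRowAdd row b c).length = row.length := by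
  unfold pvRowAdd; split_ifs <;> simp

theorem pvRowAdd_getD (n' : Nat) (row : List Int) (b c : Int) (q : Nat)
    (hl : row.length = n') (hq : q < n') :
    (pvRowAdd row b c).getD q 0 = row.getD q 0 + pvInd n' b q * c := by
  unfold pvRowAdd pvInd
  rw [hl]
  by_cases h : 0 ≤ pvEix n' b ∧ pvEix n' b < (n' : Int)
  · rw [if_pos h]
    have hlm : q < (row.modify (pvEix n' b).toNat (fun v => v + c)).length := by
      simpa [hl] using hq
    have hrq : q < row.length := by omega
    rw [List.getD_eq_getElem _ _ hlm, List.getD_eq_getElem _ _ hrq,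
      List.getElem_modify]
    by_cases he : (pvEix n' b).toNat = q
    · rw [if_pos he, if_pos ⟨h.1, h.2, he⟩]; ring
    · rw [if_neg he, if_neg (by tauto)]; ring
  · rw [if_neg h, if_neg (by tauto)]; ring

theorem pvWf_cellAdd (n' : Nat) (m : List (List Int)) (a b c : Int)
    (hm : pvWf n' m) : pvWf n' (pvCellAdd m a b c) := by
  obtain ⟨h1, h2⟩ := hm
  unfold pvCellAdd
  split_ifs with h
  · refine ⟨by simp [h1], ?_⟩
    intro row hrow
    obtain ⟨j, hj, rfl⟩ := List.mem_iff_getElem.1 hrow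
    rw [List.getElem_modify]
    split_ifs
    · rw [pvRowAdd_length]; exact h2 _ (List.getElem_mem _)
    · exact h2 _ (List.getElem_mem _)
  · exact ⟨h1, h2⟩

theorem pvGetE_cellAdd (n' : Nat) (m : List (List Int)) (a b c : Int) (p q : Nat)
    (hm : pvWf n' m) (hp : p < n') (hq : q < n') :
    pvGetE (pvCellAdd m a b c) p q = pvGetE m p q + pvInd n' a p * pvInd n' b q * c := by
  obtain ⟨h1, h2⟩ := hm
  unfold pvCellAdd pvGetE
  rw [h1]
  by_cases h : 0 ≤ pvEix n' a ∧ pvEix n' a < (n' : Int)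
  · rw [if_pos h]
    have hpl : p < (m.modify (pvEix n' a).toNat (fun row => pvRowAdd row b c)).length := by
      simpa [h1] using hp
    have hpm : p < m.length := by omega
    rw [List.getD_eq_getElem _ _ hpl, List.getD_eq_getElem _ _ hpm,
      List.getElem_modify]
    by_cases he : (pvEix n' a).toNat = p
    · rw [if_pos he]
      have hrow : (m[p]'hpm).length = n' := h2 _ (List.getElem_mem _)
      rw [pvRowAdd_getD n' _ b c q hrow hq]
      have hip : pvInd n' a p = 1 := by unfold pvInd; rw [if_pos ⟨h.1, h.2, he⟩]
      rw [hip]; ring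
    · rw [if_neg he]
      have hip : pvInd n' a p = 0 := by unfold pvInd; rw [if_neg (by tauto)]
      rw [hip]; ring
  · rw [if_neg h]
    have hip : pvInd n' a p = 0 := by unfold pvInd; rw [if_neg (by tauto)]
    rw [hip]; ring

theorem pvWf_pairAdd (n' : Nat) (m : List (List Int)) (a b c : Int)
    (hm : pvWf n' m) : pvWf n' (pvPairAdd m a b c) :=
  pvWf_cellAdd n' _ b a c (pvWf_cellAdd n' m a b c hm)

theorem pvGetE_pairAdd (n' : Nat) (m : List (List Int)) (a b c : Int) (p q : Nat)
    (hm : pvWf n' m) (hp : p < n') (hq : q < n') :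
    pvGetE (pvPairAdd m a b c) p q =
      pvGetE m p q + (pvInd n' a p * pvInd n' b q * c + pvInd n' b p * pvInd n' a q * c) := by
  unfold pvPairAdd
  rw [pvGetE_cellAdd n' _ b a c p q (pvWf_cellAdd n' m a b c hm) hp hq,
    pvGetE_cellAdd n' m a b c p q hm hp hq]
  ring

theorem pvWf_foldl {α : Type} (n' : Nat)
    (step : List (List Int) → α → List (List Int))
    (hw : ∀ m x, pvWf n' m → pvWf n' (step m x)) :
    ∀ (xs : List α) (m : List (List Int)), pvWf n' m → pvWf n' (xs.foldl step m) := by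
  intro xs
  induction xs with
  | nil => intro m hm; simpa using hm
  | cons x t ih => intro m hm; rw [List.foldl_cons]; exact ih _ (hw m x hm)

-- Generic fold lemma: a step that preserves shape and adds g x to the (p,q) entry.
theorem pvGetE_foldl {α : Type} (n' p q : Nat)
    (step : List (List Int) → α → List (List Int)) (g : α → Int)
    (hw : ∀ m x, pvWf n' m → pvWf n' (step m x))
    (hg : ∀ m x, pvWf n' m → pvGetE (step m x) p q = pvGetE m p q + g x) :
    ∀ (xs : List α) (m : List (List Int)), pvWf n' m →
      pvWf n' (xs.foldl step m) ∧
      pvGetE (xs.foldl step m) p q = pvGetE m p q + (xs.map g).sum := by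
  intro xs
  induction xs with
  | nil => intro m hm; exact ⟨hm, by simp⟩
  | cons x t ih =>
      intro m hm
      obtain ⟨w1, e1⟩ := ih (step m x) (hw m x hm)
      refine ⟨w1, ?_⟩
      rw [List.foldl_cons, e1, hg m x hm, List.map_cons, List.sum_cons]
      ring

-- Sums of 0/1 indicator values over a variable list.
def pvX (n' : Nat) (p : Nat) (vs : List Int) : Int := (vs.map (fun v => pvInd n' v p)).sum
def pvZ (n' : Nat) (p q : Nat) (vs : List Int) : Int :=
  (vs.map (fun v => pvInd n' v p * pvInd n' v q)).sum

-- The entrywise delta both per-clause bodies produce at (p,q).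
def pvG (n' : Nat) (p q : Nat) (clause : List (Int × Int)) : Int :=
  pvX n' p (clause.map (fun p => p.1)) * pvX n' q (clause.map (fun p => p.1)) -
    pvZ n' p q (clause.map (fun p => p.1))

theorem pvSumMapAdd {α : Type} (l : List α) (f g : α → Int) :
    (l.map (fun x => f x + g x)).sum = (l.map f).sum + (l.map g).sum := by
  induction l with
  | nil => simp
  | cons x t ih => simp only [List.map_cons, List.sum_cons, ih]; ring

-- range' s over getD equals the drop list
theorem pvDropGetD (vs : List Int) (s : Nat) :
    (List.range' s (vs.length - s)).map (fun j => vs.getD j 0) = vs.drop s := by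
  apply List.ext_getElem
  · simp
  · intro i h1 h2
    simp only [List.getElem_map, List.getElem_range', List.getElem_drop]
    rw [List.getD_eq_getElem]
    · congr 1; omega
    · simp at h1 ⊢; omega

-- structural "sum over tails"
def pvTS (f : Int → List Int → Int) : List Int → Int
  | [] => 0
  | v :: t => f v t + pvTS f t

theorem pvTailsSum (f : Int → List Int → Int) (vs : List Int) :
    ((List.range vs.length).map (fun i => f (vs.getD i 0) (vs.drop (i + 1)))).sum =
      pvTS f vs := by
  induction vs with
  | nil => simp [pvTS]
  | cons v t ih =>
      rw [List.length_cons, List.range_succ_eq_map, List.map_cons, List.sum_cons,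
        List.map_map]
      simp only [Function.comp_def, List.getD_cons_zero, List.getD_cons_succ,
        List.drop_succ_cons, List.drop_zero]
      rw [ih]
      rfl

-- the per-tail inner sum in closed form
theorem pvInnerSum (n' p q : Nat) (v : Int) (t : List Int) :
    (t.map (fun w => pvInd n' v p * pvInd n' w q * 1 + pvInd n' w p * pvInd n' v q * 1)).sum =
      pvInd n' v p * pvX n' q t + pvX n' p t * pvInd n' v q := by
  rw [pvSumMapAdd]
  unfold pvX
  rw [← List.sum_map_mul_left, ← List.sum_map_mul_right]
  congr 1 <;> (apply congrArg; apply List.map_congr_left; intro w _; ring)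

theorem pvTS_closed (n' p q : Nat) (vs : List Int) :
    pvTS (fun v t => pvInd n' v p * pvX n' q t + pvX n' p t * pvInd n' v q) vs =
      pvX n' p vs * pvX n' q vs - pvZ n' p q vs := by
  induction vs with
  | nil => simp [pvTS, pvX, pvZ]
  | cons v t ih =>
      rw [pvTS, ih]
      unfold pvX pvZ
      simp only [List.map_cons, List.sum_cons]
      ring

-- A's double index sum in closed form.
theorem pvAsum (n' p q : Nat) (vs : List Int) :
    ((List.range vs.length).map (fun i =>
      ((List.range' (i + 1) (vs.length - (i + 1))).map (fun j =>
        pvInd n' (vs.getD i 0) p * pvInd n' (vs.getD j 0) q * 1 +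
        pvInd n' (vs.getD j 0) p * pvInd n' (vs.getD i 0) q * 1)).sum)).sum =
      pvX n' p vs * pvX n' q vs - pvZ n' p q vs := by
  have h1 : ∀ i : Nat,
      ((List.range' (i + 1) (vs.length - (i + 1))).map (fun j =>
        pvInd n' (vs.getD i 0) p * pvInd n' (vs.getD j 0) q * 1 +
        pvInd n' (vs.getD j 0) p * pvInd n' (vs.getD i 0) q * 1)).sum =
      pvInd n' (vs.getD i 0) p * pvX n' q (vs.drop (i + 1)) +
        pvX n' p (vs.drop (i + 1)) * pvInd n' (vs.getD i 0) q := by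
    intro i
    rw [← pvInnerSum n' p q (vs.getD i 0) (vs.drop (i + 1)), ← pvDropGetD vs (i + 1),
      List.map_map]
    rfl
  calc ((List.range vs.length).map _).sum
      = ((List.range vs.length).map (fun i =>
          pvInd n' (vs.getD i 0) p * pvX n' q (vs.drop (i + 1)) +
            pvX n' p (vs.drop (i + 1)) * pvInd n' (vs.getD i 0) q)).sum := by
        congr 1; apply List.map_congr_left; intro i _; exact h1 i
    _ = pvTS (fun v t => pvInd n' v p * pvX n' q t + pvX n' p t * pvInd n' v q) vs :=
        pvTailsSum (fun v t => pvInd n' v p * pvX n' q t + pvX n' p t * pvInd n' v q) vs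
    _ = pvX n' p vs * pvX n' q vs - pvZ n' p q vs := pvTS_closed n' p q vs

theorem pvSumMapNeg {α : Type} (l : List α) (f : α → Int) :
    (l.map (fun x => -(f x))).sum = -(l.map f).sum := by
  induction l with
  | nil => simp
  | cons x t ih => simp only [List.map_cons, List.sum_cons, ih]; ring

-- B's outer-product sum over an arbitrary item list.
theorem pvBsum (n' p q : Nat) (its : List (Int × Int)) :
    (its.map (fun ac =>
      (its.map (fun bc => pvInd n' ac.1 p * pvInd n' bc.1 q * (ac.2 * bc.2))).sum +
        pvInd n' ac.1 p * pvInd n' ac.1 q * (-ac.2))).sum =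
    (its.map (fun kc => kc.2 * pvInd n' kc.1 p)).sum *
      (its.map (fun kc => kc.2 * pvInd n' kc.1 q)).sum -
      (its.map (fun kc => kc.2 * (pvInd n' kc.1 p * pvInd n' kc.1 q))).sum := by
  rw [pvSumMapAdd]
  have h1 : (its.map (fun ac =>
      (its.map (fun bc => pvInd n' ac.1 p * pvInd n' bc.1 q * (ac.2 * bc.2))).sum)).sum =
      (its.map (fun kc => kc.2 * pvInd n' kc.1 p)).sum *
        (its.map (fun kc => kc.2 * pvInd n' kc.1 q)).sum := by
    have inner : ∀ ac : Int × Int,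
        (its.map (fun bc => pvInd n' ac.1 p * pvInd n' bc.1 q * (ac.2 * bc.2))).sum =
          (ac.2 * pvInd n' ac.1 p) * (its.map (fun kc => kc.2 * pvInd n' kc.1 q)).sum := by
      intro ac
      rw [← List.sum_map_mul_left]
      congr 1; apply List.map_congr_left; intro bc _; ring
    calc (its.map _).sum
        = (its.map (fun ac =>
            (ac.2 * pvInd n' ac.1 p) * (its.map (fun kc => kc.2 * pvInd n' kc.1 q)).sum)).sum := by
          congr 1; apply List.map_congr_left; intro ac _; exact inner ac
      _ = _ := by rw [List.sum_map_mul_right]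
  have h2 : (its.map (fun ac => pvInd n' ac.1 p * pvInd n' ac.1 q * (-ac.2))).sum =
      -(its.map (fun kc => kc.2 * (pvInd n' kc.1 p * pvInd n' kc.1 q))).sum := by
    rw [← pvSumMapNeg]
    congr 1; apply List.map_congr_left; intro ac _; ring
  rw [h1, h2]; ring

-- summing a count-weighted function over distinct keys = summing over the list
theorem pvCountPick (vs : List Int) (k : Int) (f : Int → Int) :
    (vs.map (fun v => if v = k then f v else 0)).sum = (vs.count k : Int) * f k := by
  induction vs with
  | nil => simp
  | cons u t ih =>
      simp only [List.map_cons, List.sum_cons, ih, List.count_cons]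
      by_cases hu : u = k
      · subst hu; simp; ring
      · simp [hu]

theorem pvIfSum (vs : List Int) (f : Int → Int) (S : List Int) (hS : S.Nodup) :
    (S.map (fun k => (vs.count k : Int) * f k)).sum =
      (vs.map (fun v => if v ∈ S then f v else 0)).sum := by
  induction S with
  | nil => simp
  | cons k S' ih =>
      obtain ⟨hk, hnd⟩ := List.nodup_cons.1 hS
      rw [List.map_cons, List.sum_cons, ← pvCountPick vs k f, ih hnd, ← pvSumMapAdd]
      congr 1; apply List.map_congr_left; intro v _
      by_cases hv : v = k
      · subst hv
        simp [hk]
      · simp [hv, List.mem_cons]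

theorem pvDedupSum (vs : List Int) (f : Int → Int) (S : List Int) (hS : S.Nodup)
    (hall : ∀ v ∈ vs, v ∈ S) :
    (S.map (fun k => (vs.count k : Int) * f k)).sum = (vs.map f).sum := by
  rw [pvIfSum vs f S hS]
  congr 1; apply List.map_congr_left; intro v hv; simp [hall v hv]

theorem pvCounterSum (vs : List Int) (f : Int → Int) :
    (((PySem.Dict.counter vs).items).map (fun kc => kc.2 * f kc.1)).sum = (vs.map f).sum := by
  rw [PySem.Dict.items_counter, List.map_map]
  exact pvDedupSum vs f (PySem.Set.ofList vs) (PySem.Set.nodup_ofList vs)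
    (fun v hv => (PySem.Set.mem_ofList vs v).2 hv)

-- the counter built inside B is the counter of the clause's variables
theorem pvCntEq (clause : List (Int × Int)) :
    clause.foldl (fun d p => d.insert p.1 (d.getD p.1 0 + 1))
        (PySem.Dict.empty : PySem.Dict Int Int) =
      PySem.Dict.counter (clause.map (fun p => p.1)) := by
  rw [← PySem.Dict.foldl_insert_getD_add_one_eq_counter, List.foldl_map]

-- Named copies of the two per-clause step lambdas (used only by the proofs).
def pvStepAF (m : List (List Int)) (clause : List (Int × Int)) : List (List Int) :=
  (List.range (clause.map (fun p => p.1)).length).foldl (fun m i =>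
    (List.range' (i + 1) ((clause.map (fun p => p.1)).length - (i + 1))).foldl (fun m j =>
      pvPairAdd m ((clause.map (fun p => p.1)).getD i 0)
        ((clause.map (fun p => p.1)).getD j 0) 1) m) m

def pvStepBF (m : List (List Int)) (clause : List (Int × Int)) : List (List Int) :=
  if clause.length < 2 then m
  else
    ((clause.foldl (fun d p => d.insert p.1 (d.getD p.1 0 + 1))
        (PySem.Dict.empty : PySem.Dict Int Int)).items).foldl (fun m ac =>
      pvCellAdd
        (((clause.foldl (fun d p => d.insert p.1 (d.getD p.1 0 + 1))
            (PySem.Dict.empty : PySem.Dict Int Int)).items).foldl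
          (fun m bc => pvCellAdd m ac.1 bc.1 (ac.2 * bc.2)) m)
        ac.1 ac.1 (-ac.2)) m

theorem pvCMA_eq (clauses : List (List (Int × Int))) (n : Int) :
    coupling_matrix clauses n =
      clauses.foldl pvStepAF (List.replicate n.toNat (List.replicate n.toNat (0 : Int))) := rfl

theorem pvCMB_eq (clauses : List (List (Int × Int))) (n : Int) :
    coupling_matrix_alt clauses n =
      clauses.foldl pvStepBF (List.replicate n.toNat (List.replicate n.toNat (0 : Int))) := rfl

-- A's per-clause step over an arbitrary variable list, in closed form.
theorem pvStepACore (n' p q : Nat) (hp : p < n') (hq : q < n') (vs : List Int)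
    (m : List (List Int)) (hm : pvWf n' m) :
    pvWf n'
      ((List.range vs.length).foldl (fun m i =>
        (List.range' (i + 1) (vs.length - (i + 1))).foldl (fun m j =>
          pvPairAdd m (vs.getD i 0) (vs.getD j 0) 1) m) m) ∧
    pvGetE
      ((List.range vs.length).foldl (fun m i =>
        (List.range' (i + 1) (vs.length - (i + 1))).foldl (fun m j =>
          pvPairAdd m (vs.getD i 0) (vs.getD j 0) 1) m) m) p q =
      pvGetE m p q + (pvX n' p vs * pvX n' q vs - pvZ n' p q vs) := by
  have hwIn : ∀ (i : Nat) (m : List (List Int)), pvWf n' m →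
      pvWf n' ((List.range' (i + 1) (vs.length - (i + 1))).foldl (fun m j =>
        pvPairAdd m (vs.getD i 0) (vs.getD j 0) 1) m) :=
    fun i m hm => pvWf_foldl n'
      (fun (m : List (List Int)) (j : Nat) => pvPairAdd m (vs.getD i 0) (vs.getD j 0) 1)
      (fun m j hm => pvWf_pairAdd n' m (vs.getD i 0) (vs.getD j 0) 1 hm)
      (List.range' (i + 1) (vs.length - (i + 1))) m hm
  have hgIn : ∀ (i : Nat) (m : List (List Int)), pvWf n' m →
      pvGetE ((List.range' (i + 1) (vs.length - (i + 1))).foldl (fun m j =>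
        pvPairAdd m (vs.getD i 0) (vs.getD j 0) 1) m) p q =
      pvGetE m p q + ((List.range' (i + 1) (vs.length - (i + 1))).map (fun j =>
        pvInd n' (vs.getD i 0) p * pvInd n' (vs.getD j 0) q * 1 +
        pvInd n' (vs.getD j 0) p * pvInd n' (vs.getD i 0) q * 1)).sum :=
    fun i m hm => (pvGetE_foldl n' p q
      (fun (m : List (List Int)) (j : Nat) => pvPairAdd m (vs.getD i 0) (vs.getD j 0) 1)
      (fun (j : Nat) => pvInd n' (vs.getD i 0) p * pvInd n' (vs.getD j 0) q * 1 +
        pvInd n' (vs.getD j 0) p * pvInd n' (vs.getD i 0) q * 1)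
      (fun m j hm => pvWf_pairAdd n' m (vs.getD i 0) (vs.getD j 0) 1 hm)
      (fun m j hm => pvGetE_pairAdd n' m (vs.getD i 0) (vs.getD j 0) 1 p q hm hp hq)
      (List.range' (i + 1) (vs.length - (i + 1))) m hm).2
  have hout := pvGetE_foldl n' p q
    (fun (m : List (List Int)) (i : Nat) =>
      (List.range' (i + 1) (vs.length - (i + 1))).foldl (fun m j =>
        pvPairAdd m (vs.getD i 0) (vs.getD j 0) 1) m)
    (fun (i : Nat) => ((List.range' (i + 1) (vs.length - (i + 1))).map (fun j =>
      pvInd n' (vs.getD i 0) p * pvInd n' (vs.getD j 0) q * 1 +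
      pvInd n' (vs.getD j 0) p * pvInd n' (vs.getD i 0) q * 1)).sum)
    (fun m i hm => hwIn i m hm)
    (fun m i hm => hgIn i m hm)
    (List.range vs.length) m hm
  exact ⟨hout.1, by rw [hout.2, pvAsum n' p q vs]⟩

theorem pvStepA (n' p q : Nat) (hp : p < n') (hq : q < n')
    (m : List (List Int)) (clause : List (Int × Int)) (hm : pvWf n' m) :
    pvWf n' (pvStepAF m clause) ∧
    pvGetE (pvStepAF m clause) p q = pvGetE m p q + pvG n' p q clause := by
  unfold pvStepAF pvG
  exact pvStepACore n' p q hp hq (clause.map (fun (x : Int × Int) => x.1)) m hm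

theorem pvStepAF_wf (n' : Nat) (m : List (List Int)) (clause : List (Int × Int))
    (hm : pvWf n' m) : pvWf n' (pvStepAF m clause) := by
  unfold pvStepAF
  exact pvWf_foldl n'
    (fun (m : List (List Int)) (i : Nat) =>
      (List.range' (i + 1) ((clause.map (fun p => p.1)).length - (i + 1))).foldl (fun m j =>
        pvPairAdd m ((clause.map (fun p => p.1)).getD i 0)
          ((clause.map (fun p => p.1)).getD j 0) 1) m)
    (fun m i hm => pvWf_foldl n'
      (fun (m : List (List Int)) (j : Nat) =>
        pvPairAdd m ((clause.map (fun p => p.1)).getD i 0)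
          ((clause.map (fun p => p.1)).getD j 0) 1)
      (fun m j hm => pvWf_pairAdd n' m _ _ 1 hm)
      (List.range' (i + 1) ((clause.map (fun p => p.1)).length - (i + 1))) m hm)
    (List.range (clause.map (fun p => p.1)).length) m hm

-- B's per-clause step over an arbitrary item list.
theorem pvStepBCore (n' p q : Nat) (hp : p < n') (hq : q < n') (its : List (Int × Int))
    (m : List (List Int)) (hm : pvWf n' m) :
    pvWf n'
      (its.foldl (fun m ac =>
        pvCellAdd (its.foldl (fun m bc => pvCellAdd m ac.1 bc.1 (ac.2 * bc.2)) m)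
          ac.1 ac.1 (-ac.2)) m) ∧
    pvGetE
      (its.foldl (fun m ac =>
        pvCellAdd (its.foldl (fun m bc => pvCellAdd m ac.1 bc.1 (ac.2 * bc.2)) m)
          ac.1 ac.1 (-ac.2)) m) p q =
      pvGetE m p q +
        ((its.map (fun kc => kc.2 * pvInd n' kc.1 p)).sum *
          (its.map (fun kc => kc.2 * pvInd n' kc.1 q)).sum -
          (its.map (fun kc => kc.2 * (pvInd n' kc.1 p * pvInd n' kc.1 q))).sum) := by
  have hwIn : ∀ (ac : Int × Int) (m : List (List Int)), pvWf n' m →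
      pvWf n' (its.foldl (fun m bc => pvCellAdd m ac.1 bc.1 (ac.2 * bc.2)) m) :=
    fun ac m hm => pvWf_foldl n'
      (fun (m : List (List Int)) (bc : Int × Int) => pvCellAdd m ac.1 bc.1 (ac.2 * bc.2))
      (fun m bc hm => pvWf_cellAdd n' m ac.1 bc.1 (ac.2 * bc.2) hm) its m hm
  have hgIn : ∀ (ac : Int × Int) (m : List (List Int)), pvWf n' m →
      pvGetE (its.foldl (fun m bc => pvCellAdd m ac.1 bc.1 (ac.2 * bc.2)) m) p q =
      pvGetE m p q + (its.map (fun bc =>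
        pvInd n' ac.1 p * pvInd n' bc.1 q * (ac.2 * bc.2))).sum :=
    fun ac m hm => (pvGetE_foldl n' p q
      (fun (m : List (List Int)) (bc : Int × Int) => pvCellAdd m ac.1 bc.1 (ac.2 * bc.2))
      (fun (bc : Int × Int) => pvInd n' ac.1 p * pvInd n' bc.1 q * (ac.2 * bc.2))
      (fun m bc hm => pvWf_cellAdd n' m ac.1 bc.1 (ac.2 * bc.2) hm)
      (fun m bc hm => pvGetE_cellAdd n' m ac.1 bc.1 (ac.2 * bc.2) p q hm hp hq)
      its m hm).2
  have hout := pvGetE_foldl n' p q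
    (fun (m : List (List Int)) (ac : Int × Int) =>
      pvCellAdd (its.foldl (fun m bc => pvCellAdd m ac.1 bc.1 (ac.2 * bc.2)) m)
        ac.1 ac.1 (-ac.2))
    (fun (ac : Int × Int) =>
      (its.map (fun bc => pvInd n' ac.1 p * pvInd n' bc.1 q * (ac.2 * bc.2))).sum +
        pvInd n' ac.1 p * pvInd n' ac.1 q * (-ac.2))
    (fun m ac hm => pvWf_cellAdd n' _ ac.1 ac.1 (-ac.2) (hwIn ac m hm))
    (fun m ac hm => by
      rw [pvGetE_cellAdd n' _ ac.1 ac.1 (-ac.2) p q (hwIn ac m hm) hp hq, hgIn ac m hm]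
      ring)
    its m hm
  exact ⟨hout.1, by rw [hout.2, pvBsum n' p q its]⟩

theorem pvStepB (n' p q : Nat) (hp : p < n') (hq : q < n')
    (m : List (List Int)) (clause : List (Int × Int)) (hm : pvWf n' m) :
    pvWf n' (pvStepBF m clause) ∧
    pvGetE (pvStepBF m clause) p q = pvGetE m p q + pvG n' p q clause := by
  unfold pvStepBF
  split_ifs with hlen
  · refine ⟨hm, ?_⟩
    have hg0 : pvG n' p q clause = 0 := by
      rcases clause with _ | ⟨x, _ | ⟨y, t⟩⟩
      · simp [pvG, pvX, pvZ]
      · simp only [pvG, pvX, pvZ, List.map_cons, List.map_nil, List.sum_cons,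
          List.sum_nil]
        ring
      · simp at hlen
    rw [hg0]; ring
  · have hcore := pvStepBCore n' p q hp hq
      ((clause.foldl (fun d p => d.insert p.1 (d.getD p.1 0 + 1))
          (PySem.Dict.empty : PySem.Dict Int Int)).items) m hm
    refine ⟨hcore.1, ?_⟩
    rw [hcore.2, pvCntEq clause]
    have e1 := pvCounterSum (clause.map (fun p => p.1)) (fun (a : Int) => pvInd n' a p)
    have e2 := pvCounterSum (clause.map (fun p => p.1)) (fun (a : Int) => pvInd n' a q)
    have e3 := pvCounterSum (clause.map (fun p => p.1))
      (fun (a : Int) => pvInd n' a p * pvInd n' a q)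
    rw [e1, e2, e3]
    rfl

theorem pvStepBF_wf (n' : Nat) (m : List (List Int)) (clause : List (Int × Int))
    (hm : pvWf n' m) : pvWf n' (pvStepBF m clause) := by
  unfold pvStepBF
  split_ifs with hlen
  · exact hm
  · exact pvWf_foldl n'
      (fun (m : List (List Int)) (ac : Int × Int) =>
        pvCellAdd
          (((clause.foldl (fun d p => d.insert p.1 (d.getD p.1 0 + 1))
              (PySem.Dict.empty : PySem.Dict Int Int)).items).foldl
            (fun m bc => pvCellAdd m ac.1 bc.1 (ac.2 * bc.2)) m)
          ac.1 ac.1 (-ac.2))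
      (fun m ac hm => pvWf_cellAdd n' _ ac.1 ac.1 (-ac.2)
        (pvWf_foldl n'
          (fun (m : List (List Int)) (bc : Int × Int) =>
            pvCellAdd m ac.1 bc.1 (ac.2 * bc.2))
          (fun m bc hm => pvWf_cellAdd n' m ac.1 bc.1 (ac.2 * bc.2) hm)
          ((clause.foldl (fun d p => d.insert p.1 (d.getD p.1 0 + 1))
              (PySem.Dict.empty : PySem.Dict Int Int)).items) m hm))
      ((clause.foldl (fun d p => d.insert p.1 (d.getD p.1 0 + 1))
          (PySem.Dict.empty : PySem.Dict Int Int)).items) m hm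

-- well-formed matrices with equal entries are equal
theorem pvWf_ext (n' : Nat) (m1 m2 : List (List Int))
    (h1 : pvWf n' m1) (h2 : pvWf n' m2)
    (h : ∀ p q, p < n' → q < n' → pvGetE m1 p q = pvGetE m2 p q) : m1 = m2 := by
  apply List.ext_getElem (by rw [h1.1, h2.1])
  intro p hp1 hp2
  apply List.ext_getElem
    (by rw [h1.2 _ (List.getElem_mem _), h2.2 _ (List.getElem_mem _)])
  intro q hq1 hq2
  have hp : p < n' := by rw [← h1.1]; exact hp1
  have hq : q < n' := by rw [← h1.2 _ (List.getElem_mem hp1)]; exact hq1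
  have := h p q hp hq
  unfold pvGetE at this
  rwa [List.getD_eq_getElem _ _ hp1, List.getD_eq_getElem _ _ hp2,
    List.getD_eq_getElem _ _ hq1, List.getD_eq_getElem _ _ hq2] at this

theorem pvWf_zero (n' : Nat) : pvWf n' (List.replicate n' (List.replicate n' (0 : Int))) := by
  refine ⟨by simp, ?_⟩
  intro row hrow
  rw [List.eq_of_mem_replicate hrow]; simp

-- ===== VERDICT (by name: the statement is the Claim_ definition above) =====
theorem coupling_matrix_spec : Claim_equal_coupling_matrix := by
  intro clauses n _ _
  unfold Spec_coupling_matrix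
  rw [pvCMA_eq, pvCMB_eq]
  have hz := pvWf_zero n.toNat
  apply pvWf_ext n.toNat
  · exact pvWf_foldl n.toNat pvStepAF (fun m c hm => pvStepAF_wf n.toNat m c hm) clauses _ hz
  · exact pvWf_foldl n.toNat pvStepBF (fun m c hm => pvStepBF_wf n.toNat m c hm) clauses _ hz
  · intro p q hp hq
    have hA := (pvGetE_foldl n.toNat p q pvStepAF (pvG n.toNat p q)
      (fun m c hm => (pvStepA n.toNat p q hp hq m c hm).1)
      (fun m c hm => (pvStepA n.toNat p q hp hq m c hm).2)
      clauses _ hz).2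
    have hB := (pvGetE_foldl n.toNat p q pvStepBF (pvG n.toNat p q)
      (fun m c hm => (pvStepB n.toNat p q hp hq m c hm).1)
      (fun m c hm => (pvStepB n.toNat p q hp hq m c hm).2)
      clauses _ hz).2
    rw [hA, hB]
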